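-- pv_equiv track=rewrite | github.com/wjbaek0/mois_NLP | 04_depend_par_prj/srl_prj/BERT_for_Korean_SRL/dataio.py | data2tgt_data
-- ===== SOURCE A (Python) =====
-- def data2tgt_data(input_data):
--     result = []
--
--     for item in input_data:
--         ori_tokens, ori_preds, ori_args = item[0],item[1],item[2]
--
--         for idx in range(len(ori_preds)):
--             pred = ori_preds[idx]
--             if pred != '_':
--                 if idx == 0:
--                     begin = idx
--                 elif ori_preds[idx-1] == '_':
--                     begin = idx
--                 end = idx
--
--         tokens, preds, args = [],[],[]
--
--         for idx in range(len(ori_preds)):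
--             token = ori_tokens[idx]
--             pred = ori_preds[idx]
--             arg = ori_args[idx]
--
--
--             if idx == begin:
--                 tokens.append('<tgt>')
--                 preds.append('_')
--                 args.append('X')
--
--             tokens.append(token)
--             preds.append(pred)
--             args.append(arg)
--
--             if idx == end:
--                 tokens.append('</tgt>')
--                 preds.append('_')
--                 args.append('X')
--         sent = []
--         sent.append(tokens)
--         sent.append(preds)
--         sent.append(args)
--         result.append(sent)
--
--     return result
-- ===== SOURCE B (Python) =====
-- def data2tgt_data(input_data):
--     result = []
--     for ori_tokens, ori_preds, ori_args in input_data: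
--         n = len(ori_preds)
--         end = n - 1
--         while end >= 0 and ori_preds[end] == '_':
--             end -= 1
--         if end < 0:
--             result.append([ori_tokens[:n], ori_preds[:n], ori_args[:n]])
--             continue
--         begin = end
--         while begin > 0 and ori_preds[begin - 1] != '_':
--             begin -= 1
--         tokens = ori_tokens[:begin] + ['<tgt>'] + ori_tokens[begin:end + 1] + ['</tgt>'] + ori_tokens[end + 1:n]
--         preds = ori_preds[:begin] + ['_'] + ori_preds[begin:end + 1] + ['_'] + ori_preds[end + 1:n]
--         args = ori_args[:begin] + ['X'] + ori_args[begin:end + 1] + ['X'] + ori_args[end + 1:n]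
--         result.append([tokens, preds, args])
--     return result
-- ===== Notes on version B (the rewrite author's own statement) =====
-- stated objective: simpler
-- what changed: B replaces A's two left-to-right index loops with cross-iteration begin/end state by a per-item right-to-left scan for the last predicate span followed by list slicing to insert the markers.
-- intended difference: On items whose nonempty preds are all '_' but which follow a predicate-bearing item, A inserts markers at begin/end positions left over from the earlier item (leftover loop state), while B leaves the item unmarked, which is the intended behaviour (no predicate, no target). — e.g. on data2tgt_data([(["a"], ["V"], ["A0"]), (["b"], ["_"], ["O"])]): A returns [[["<tgt>", "a", "</tgt>"], ["_", "V", "_"], ["X", "A0", "X"]], [["<tgt>", "b", "</tgt>"], ["_", "_", "_"], ["X", "O", …, B returns [[["<tgt>", "a", "</tgt>"], ["_", "V", "_"], ["X", "A0", "X"]], [["b"], ["_"], ["O"]]]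
-- outside the precondition, e.g. on data2tgt_data([(['a'], ['_'], ['x'])]): A raises UnboundLocalError, B returns [[['a'], ['_'], ['x']]]
import Mathlib
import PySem

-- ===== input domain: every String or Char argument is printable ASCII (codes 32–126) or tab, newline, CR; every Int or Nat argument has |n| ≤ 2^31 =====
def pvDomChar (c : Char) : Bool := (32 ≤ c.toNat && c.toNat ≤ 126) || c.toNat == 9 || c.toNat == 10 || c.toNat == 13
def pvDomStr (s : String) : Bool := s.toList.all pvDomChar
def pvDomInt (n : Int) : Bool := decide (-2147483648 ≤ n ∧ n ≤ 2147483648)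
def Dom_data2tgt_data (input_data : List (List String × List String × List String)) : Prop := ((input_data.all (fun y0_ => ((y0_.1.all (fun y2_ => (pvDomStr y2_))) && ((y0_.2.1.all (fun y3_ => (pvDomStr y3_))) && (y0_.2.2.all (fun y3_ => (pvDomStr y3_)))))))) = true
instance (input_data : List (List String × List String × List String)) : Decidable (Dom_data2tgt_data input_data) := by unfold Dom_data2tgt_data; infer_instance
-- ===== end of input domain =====

-- B replaces A's two index loops with cross-iteration begin/end state by a per-item right-to-left span
-- scan plus list slicing (return value only; neither version mutates its argument).

-- ===== PORT A =====
-- first inner loop of A: scan ori_preds left to right, updating begin/end (unbound = none)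
def aFirst (preds : List String) (st : Option Nat × Option Nat) : Option Nat × Option Nat :=
  (List.range preds.length).foldl (fun st idx =>
    let pred := preds.getD idx ""
    if pred ≠ "_" then
      ((if idx = 0 then some idx
        else if preds.getD (idx - 1) "" = "_" then some idx
        else st.1), some idx)
    else st) st

-- second inner loop of A: rebuild the three lists, inserting markers at begin/end
def aSecond (oriTokens oriPreds oriArgs : List String) (begin? end? : Option Nat) : List (List String) :=
  let acc := (List.range oriPreds.length).foldl
    (fun (acc : List String × List String × List String) idx =>
      let token := oriTokens.getD idx ""
      let pred := oriPreds.getD idx ""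
      let arg := oriArgs.getD idx ""
      let acc := if some idx = begin? then (acc.1 ++ ["<tgt>"], acc.2.1 ++ ["_"], acc.2.2 ++ ["X"]) else acc
      let acc := (acc.1 ++ [token], acc.2.1 ++ [pred], acc.2.2 ++ [arg])
      if some idx = end? then (acc.1 ++ ["</tgt>"], acc.2.1 ++ ["_"], acc.2.2 ++ ["X"]) else acc)
    ([], [], [])
  [acc.1, acc.2.1, acc.2.2]

-- A's outer loop; begin/end persist across items exactly as in the Python
def aGo : List (List String × List String × List String) → Option Nat × Option Nat → List (List (List String))
  | [], _ => []
  | item :: rest, st =>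
    let st' := aFirst item.2.1 st
    aSecond item.1 item.2.1 item.2.2 st'.1 st'.2 :: aGo rest st'

def data2tgt_data (input_data : List (List String × List String × List String)) : List (List (List String)) :=
  aGo input_data (none, none)

-- ===== PORT B =====
-- B: "end = n-1; while end >= 0 and preds[end] == '_': end -= 1"  (argument = end + 1; none = no predicate)
def bScanEnd (preds : List String) : Nat → Option Nat
  | 0 => none
  | k + 1 => if preds.getD k "" = "_" then bScanEnd preds k else some k

-- B: "begin = end; while begin > 0 and preds[begin-1] != '_': begin -= 1"
def bScanBegin (preds : List String) : Nat → Nat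
  | 0 => 0
  | b + 1 => if preds.getD b "" ≠ "_" then bScanBegin preds b else b + 1

def bItem (item : List String × List String × List String) : List (List String) :=
  let n := item.2.1.length
  match bScanEnd item.2.1 n with
  | none => [item.1.take n, item.2.1.take n, item.2.2.take n]
  | some e =>
    let b := bScanBegin item.2.1 e
    [ item.1.take b ++ ["<tgt>"] ++ (item.1.take (e + 1)).drop b ++ ["</tgt>"] ++ (item.1.take n).drop (e + 1),
      item.2.1.take b ++ ["_"] ++ (item.2.1.take (e + 1)).drop b ++ ["_"] ++ (item.2.1.take n).drop (e + 1),
      item.2.2.take b ++ ["X"] ++ (item.2.2.take (e + 1)).drop b ++ ["X"] ++ (item.2.2.take n).drop (e + 1) ]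

def data2tgt_data_alt (input_data : List (List String × List String × List String)) : List (List (List String)) :=
  input_data.map bItem

-- ===== PRECONDITION & SPEC =====
-- Pre_ excludes exactly the inputs on which A raises: an item whose token or arg list is shorter
-- than its pred list (IndexError), or an item with nonempty preds such that no item up to and
-- including it contains a predicate (UnboundLocalError: begin/end never bound).
def Pre_data2tgt_data (input_data : List (List String × List String × List String)) : Prop :=
  (∀ it ∈ input_data, it.2.1.length ≤ it.1.length ∧ it.2.1.length ≤ it.2.2.length) ∧
  (∀ i, i < input_data.length → input_data[i]!.2.1 ≠ [] →
    ∃ j, j ≤ i ∧ ∃ s ∈ input_data[j]!.2.1, s ≠ "_")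

instance (input_data : List (List String × List String × List String)) : Decidable (Pre_data2tgt_data input_data) := by
  unfold Pre_data2tgt_data; infer_instance

def pvWitness_data2tgt_data : (List (List String × List String × List String)) :=
  [(["a"], ["V"], ["A0"])]

-- On items whose nonempty preds are all '_' but which follow a predicate-bearing item, A silently
-- inserts the markers at begin/end positions left over from that earlier item (leftover loop state),
-- while B leaves such an item unmarked, which is the intended behaviour (no predicate, no target).
-- (Closed form: item i's preds are all '_' and nonempty; among the earlier items, the last one that
-- is not all-'_' exists (q ≠ []), and the begin of its final predicate run — the length left after
-- stripping trailing '_'s and then the trailing run of non-'_'s — still falls inside item i's preds.)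
def D_data2tgt_data (input_data : List (List String × List String × List String)) : Prop :=
  ∃ i, i < input_data.length ∧
    let pi := input_data[i]!.2.1
    let q := (((input_data.take i).rdropWhile (·.2.1.all (· == "_"))).getLastD default).2.1.rdropWhile (· == "_")
    (∀ s ∈ pi, s = "_") ∧ q ≠ [] ∧ (q.rdropWhile (· != "_")).length < pi.length

instance (input_data : List (List String × List String × List String)) : Decidable (D_data2tgt_data input_data) := by
  unfold D_data2tgt_data; infer_instance

def Spec_data2tgt_data (input_data : List (List String × List String × List String)) (out : List (List (List String))) : Prop :=
  ¬ D_data2tgt_data input_data → out = data2tgt_data_alt input_data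

instance (input_data : List (List String × List String × List String)) (out : List (List (List String))) : Decidable (Spec_data2tgt_data input_data out) := by
  unfold Spec_data2tgt_data; infer_instance

def pvDiffWitness_data2tgt_data : (List (List String × List String × List String)) :=
  [(["a"], ["V"], ["A0"]), (["b"], ["_"], ["O"])]

def pvDiffWitnessOut_data2tgt_data : (List (List (List String))) × (List (List (List String))) :=
  ([[["<tgt>", "a", "</tgt>"], ["_", "V", "_"], ["X", "A0", "X"]],
    [["<tgt>", "b", "</tgt>"], ["_", "_", "_"], ["X", "O", "X"]]],
   [[["<tgt>", "a", "</tgt>"], ["_", "V", "_"], ["X", "A0", "X"]],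
    [["b"], ["_"], ["O"]]])

-- ===== CLAIM (what is proved, stated in full; the proofs are below) =====
def Claim_unchanged_data2tgt_data : Prop := ∀ (input_data : List (List String × List String × List String)), Dom_data2tgt_data input_data → Pre_data2tgt_data input_data → Spec_data2tgt_data input_data (data2tgt_data input_data)

def Claim_changed_data2tgt_data : Prop := Dom_data2tgt_data (pvDiffWitness_data2tgt_data) ∧ Pre_data2tgt_data (pvDiffWitness_data2tgt_data) ∧ D_data2tgt_data (pvDiffWitness_data2tgt_data) ∧ data2tgt_data (pvDiffWitness_data2tgt_data) = pvDiffWitnessOut_data2tgt_data.1 ∧ data2tgt_data_alt (pvDiffWitness_data2tgt_data) = pvDiffWitnessOut_data2tgt_data.2 ∧ pvDiffWitnessOut_data2tgt_data.1 ≠ pvDiffWitnessOut_data2tgt_data.2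

def Claim_exact_data2tgt_data : Prop := ∀ (input_data : List (List String × List String × List String)), Dom_data2tgt_data input_data → Pre_data2tgt_data input_data → D_data2tgt_data input_data → data2tgt_data input_data ≠ data2tgt_data_alt input_data

-- ===== LEMMAS AND PROOFS =====

-- ---- proof-only abbreviation for "item i's pred list" and getElem!/getD bridges ----

def pPreds (input_data : List (List String × List String × List String)) (i : Nat) : List String :=
  (input_data.getD i ([], [], [])).2.1

theorem pvBang_eq (l : List (List String × List String × List String)) (i : Nat) :
    l[i]!.2.1 = pPreds l i := by
  unfold pPreds
  have : (default : List String × List String × List String) = ([], [], []) := rfl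
  rw [List.getElem!_eq_getElem?_getD, List.getD_eq_getElem?_getD, this]

theorem pvAllU_iff (l : List String) :
    (∀ s ∈ l, s = "_") ↔ (∀ m, m < l.length → l.getD m "" = "_") := by
  constructor
  · intro h m hm
    rw [List.getD_eq_getElem l "" hm]
    exact h _ (List.getElem_mem hm)
  · intro h s hs
    obtain ⟨m, hm, rfl⟩ := List.mem_iff_getElem.mp hs
    have := h m hm
    rwa [List.getD_eq_getElem l "" hm] at this




theorem pvGetD_append_length {α : Type} (l1 : List α) (x : α) (l2 : List α) (d : α) :
    (l1 ++ x :: l2).getD l1.length d = x := by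
  induction l1 with
  | nil => rfl
  | cons a l ih => simpa using ih

theorem pPreds_append_left (pre l : List (List String × List String × List String)) (k : Nat)
    (hk : k < pre.length) :
    pPreds (pre ++ l) k = pPreds pre k := by
  unfold pPreds
  have hlen : k < (pre ++ l).length := by simp; omega
  rw [List.getD_eq_getElem _ _ hlen, List.getD_eq_getElem _ _ hk]
  rw [List.getElem_append_left hk]

theorem pPreds_append_self (pre : List (List String × List String × List String))
    (it : List String × List String × List String) (l : List (List String × List String × List String)) :
    pPreds (pre ++ it :: l) pre.length = it.2.1 := by
  unfold pPreds
  rw [pvGetD_append_length]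

theorem pPreds_getElem (l : List (List String × List String × List String)) (i : Nat)
    (h : i < l.length) : pPreds l i = l[i].2.1 := by
  unfold pPreds
  rw [List.getD_eq_getElem _ _ h]

theorem pPreds_take (l : List (List String × List String × List String)) (i k : Nat)
    (hk : k < i) (hi : i ≤ l.length) :
    pPreds (l.take i) k = pPreds l k := by
  have hk' : k < l.length := by omega
  have hlen : k < (l.take i).length := by simp [List.length_take]; omega
  rw [pPreds_getElem _ _ hlen, pPreds_getElem _ _ hk']
  simp [List.getElem_take]

-- ---- B's scanners: specification and uniqueness ----

theorem bScanEnd_succ (preds : List String) (k : Nat) :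
    bScanEnd preds (k + 1) = if preds.getD k "" = "_" then bScanEnd preds k else some k := rfl

theorem bScanBegin_succ (preds : List String) (b : Nat) :
    bScanBegin preds (b + 1) = if preds.getD b "" ≠ "_" then bScanBegin preds b else b + 1 := rfl

theorem bScanEnd_none_spec (preds : List String) :
    ∀ k, bScanEnd preds k = none → ∀ m, m < k → preds.getD m "" = "_" := by
  intro k
  induction k with
  | zero => intro _ m hm; omega
  | succ k ih =>
    intro h m hm
    rw [bScanEnd_succ] at h
    by_cases hk : preds.getD k "" = "_"
    · rw [if_pos hk] at h
      rcases Nat.lt_succ_iff_lt_or_eq.mp hm with h' | h'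
      · exact ih h m h'
      · simpa [h'] using hk
    · rw [if_neg hk] at h
      exact absurd h (by simp)

theorem bScanEnd_some_spec (preds : List String) :
    ∀ k E, bScanEnd preds k = some E →
      E < k ∧ preds.getD E "" ≠ "_" ∧ ∀ m, E < m → m < k → preds.getD m "" = "_" := by
  intro k
  induction k with
  | zero => intro E h; exact absurd h (by simp [bScanEnd])
  | succ k ih =>
    intro E h
    rw [bScanEnd_succ] at h
    by_cases hk : preds.getD k "" = "_"
    · rw [if_pos hk] at h
      obtain ⟨h1, h2, h3⟩ := ih E h
      refine ⟨by omega, h2, ?_⟩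
      intro m hm1 hm2
      rcases Nat.lt_succ_iff_lt_or_eq.mp hm2 with h' | h'
      · exact h3 m hm1 h'
      · simpa [h'] using hk
    · rw [if_neg hk] at h
      have hEk : E = k := by
        have := h
        simp at this
        omega
      subst hEk
      exact ⟨by omega, hk, by omega⟩


theorem bScanBegin_le (preds : List String) : ∀ k, bScanBegin preds k ≤ k := by
  intro k
  induction k with
  | zero => simp [bScanBegin]
  | succ k ih =>
    rw [bScanBegin_succ]
    split
    · omega
    · omega

theorem bScanBegin_run (preds : List String) :
    ∀ k m, bScanBegin preds k ≤ m → m < k → preds.getD m "" ≠ "_" := by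
  intro k
  induction k with
  | zero => intro m _ h; omega
  | succ k ih =>
    intro m h1 h2
    rw [bScanBegin_succ] at h1
    by_cases hk : preds.getD k "" ≠ "_"
    · rw [if_pos hk] at h1
      rcases Nat.lt_succ_iff_lt_or_eq.mp h2 with h' | h'
      · exact ih m h1 h'
      · simpa [h'] using hk
    · rw [if_neg hk] at h1
      omega

theorem bScanBegin_boundary (preds : List String) :
    ∀ k, bScanBegin preds k = 0 ∨ preds.getD (bScanBegin preds k - 1) "" = "_" := by
  intro k
  induction k with
  | zero => left; simp [bScanBegin]
  | succ k ih =>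
    rw [bScanBegin_succ]
    by_cases hk : preds.getD k "" ≠ "_"
    · rw [if_pos hk]
      exact ih
    · rw [if_neg hk]
      right
      simpa using hk


-- ---- A's first loop computes exactly what B's scanners compute ----

def pvStepSt (st : Option Nat × Option Nat) (preds : List String) : Option Nat × Option Nat :=
  match bScanEnd preds preds.length with
  | some E => (some (bScanBegin preds E), some E)
  | none => st

theorem aFirst_aux (preds : List String) :
    ∀ k st, (List.range k).foldl (fun st idx =>
      let pred := preds.getD idx ""
      if pred ≠ "_" then
        ((if idx = 0 then some idx
          else if preds.getD (idx - 1) "" = "_" then some idx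
          else st.1), some idx)
      else st) st =
      (match bScanEnd preds k with
       | some E => (some (bScanBegin preds E), some E)
       | none => st) := by
  intro k
  induction k with
  | zero => intro st; simp [bScanEnd]
  | succ k ih =>
    intro st
    rw [List.range_succ, List.foldl_append, ih st]
    simp only [List.foldl_cons, List.foldl_nil]
    by_cases hk : preds.getD k "" = "_"
    · rw [bScanEnd_succ, if_pos hk]
      cases hE : bScanEnd preds k <;> simp [← List.getD_eq_getElem?_getD, hk]
    · rw [bScanEnd_succ, if_neg hk]
      simp only [hk, ne_eq, not_false_eq_true, if_true]
      cases k with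
      | zero => simp [bScanBegin]
      | succ s =>
        simp only [Nat.add_sub_cancel, Nat.succ_ne_zero, if_false]
        by_cases hs : preds.getD s "" = "_"
        · rw [bScanBegin_succ, if_neg (not_not_intro hs)]
          simp [← List.getD_eq_getElem?_getD, hs]
        · have hEs : bScanEnd preds (s + 1) = some s := by
            rw [bScanEnd_succ, if_neg hs]
          rw [bScanBegin_succ, if_pos hs]
          simp [← List.getD_eq_getElem?_getD, hs, hEs]

theorem aFirst_eq (preds : List String) (st : Option Nat × Option Nat) :
    aFirst preds st = pvStepSt st preds := by
  unfold aFirst pvStepSt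
  exact aFirst_aux preds preds.length st

-- ---- A's second loop as a marker-insertion over a single list ----

def pvLoop1 (xs : List String) (m1 m2 : String) (b? e? : Option Nat) (k : Nat) : List String :=
  (List.range k).foldl (fun acc idx =>
    let a1 := if some idx = b? then acc ++ [m1] else acc
    let a2 := a1 ++ [xs.getD idx ""]
    if some idx = e? then a2 ++ [m2] else a2) []

theorem pvLoop1_succ (xs : List String) (m1 m2 : String) (b? e? : Option Nat) (k : Nat) :
    pvLoop1 xs m1 m2 b? e? (k + 1) =
      (let a1 := if some k = b? then pvLoop1 xs m1 m2 b? e? k ++ [m1] else pvLoop1 xs m1 m2 b? e? k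
       let a2 := a1 ++ [xs.getD k ""]
       if some k = e? then a2 ++ [m2] else a2) := by
  unfold pvLoop1
  rw [List.range_succ, List.foldl_append]
  simp

theorem aSecond_eq (t p a : List String) (b? e? : Option Nat) :
    aSecond t p a b? e? =
      [pvLoop1 t "<tgt>" "</tgt>" b? e? p.length,
       pvLoop1 p "_" "_" b? e? p.length,
       pvLoop1 a "X" "X" b? e? p.length] := by
  unfold aSecond
  have key : ∀ k, (List.range k).foldl
      (fun (acc : List String × List String × List String) idx =>
        let token := t.getD idx ""
        let pred := p.getD idx ""
        let arg := a.getD idx ""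
        let acc := if some idx = b? then (acc.1 ++ ["<tgt>"], acc.2.1 ++ ["_"], acc.2.2 ++ ["X"]) else acc
        let acc := (acc.1 ++ [token], acc.2.1 ++ [pred], acc.2.2 ++ [arg])
        if some idx = e? then (acc.1 ++ ["</tgt>"], acc.2.1 ++ ["_"], acc.2.2 ++ ["X"]) else acc)
      ([], [], []) =
      (pvLoop1 t "<tgt>" "</tgt>" b? e? k, pvLoop1 p "_" "_" b? e? k, pvLoop1 a "X" "X" b? e? k) := by
    intro k
    induction k with
    | zero => simp [pvLoop1]
    | succ k ih =>
      rw [List.range_succ, List.foldl_append, ih]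
      simp only [List.foldl_cons, List.foldl_nil]
      rw [pvLoop1_succ, pvLoop1_succ, pvLoop1_succ]
      by_cases hb : some k = b? <;> by_cases he : some k = e? <;>
        simp [hb, he] <;> (try (split <;> simp)) <;> (try (split <;> simp_all))
  rw [key p.length]

theorem pvLoop1_zones (xs : List String) (m1 m2 : String) (B E : Nat) (hBE : B ≤ E) :
    ∀ k, k ≤ xs.length →
      pvLoop1 xs m1 m2 (some B) (some E) k =
        (if k ≤ B then xs.take k
         else if k ≤ E then xs.take B ++ [m1] ++ (xs.take k).drop B
         else xs.take B ++ [m1] ++ (xs.take (E + 1)).drop B ++ [m2] ++ (xs.take k).drop (E + 1)) := by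
  intro k
  induction k with
  | zero => intro _; simp [pvLoop1]
  | succ k ih =>
    intro hk
    have hk' : k ≤ xs.length := by omega
    have hklt : k < xs.length := by omega
    have hget : xs.getD k "" = xs[k] := List.getD_eq_getElem xs "" hklt
    have htake : xs.take (k + 1) = xs.take k ++ [xs[k]] := by
      rw [List.take_succ, List.getElem?_eq_getElem hklt]
      rfl
    have hlentake : (xs.take k).length = k := by
      simp [List.length_take]
      omega
    rw [pvLoop1_succ, ih hk']
    by_cases h1 : k + 1 ≤ B
    · have hkB : ¬ (some k = some B) := by simp; omega
      have hkE : ¬ (some k = some E) := by simp; omega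
      simp only [if_pos (by omega : k ≤ B), if_pos h1, if_neg hkB, if_neg hkE, hget]
      rw [htake]
    · by_cases h2 : k + 1 ≤ E
      · by_cases hkB : k = B
        · subst hkB
          simp only [if_pos (le_refl k), if_neg h1, if_pos h2, if_pos rfl,
            if_neg (by simp; omega : ¬ (some k = some E)), hget]
          rw [htake, List.drop_append_of_le_length (by omega), List.drop_of_length_le (by omega)]
          simp
        · have hBk : B < k := by omega
          simp only [if_neg (by omega : ¬ (k ≤ B)), if_pos (by omega : k ≤ E), if_neg h1,
            if_pos h2, if_neg (by simp; omega : ¬ (some k = some B)),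
            if_neg (by simp; omega : ¬ (some k = some E)), hget]
          rw [htake, List.drop_append_of_le_length (by omega)]
          simp [List.append_assoc]
      · by_cases hkE : k = E
        · subst hkE
          by_cases hkB : k = B
          · subst hkB
            simp only [if_pos (le_refl k), if_neg h1, if_neg h2, if_pos rfl, hget]
            rw [htake, List.drop_append_of_le_length (by omega), List.drop_of_length_le (by omega)]
            have hdropk1 : (xs.take (k + 1)).drop (k + 1) = [] := by
              apply List.drop_of_length_le
              simp [List.length_take]
            rw [htake] at hdropk1
            rw [hdropk1]
            simp
          · have hBk : B < k := by omega
            simp only [if_neg (by omega : ¬ (k ≤ B)), if_pos (le_refl k), if_neg h1, if_neg h2,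
              if_neg (by simp; omega : ¬ (some k = some B)), if_pos rfl, hget]
            rw [htake, List.drop_append_of_le_length (by omega)]
            have hdropk1 : (xs.take k ++ [xs[k]]).drop (k + 1) = [] := by
              apply List.drop_of_length_le
              simp [List.length_take]
            rw [hdropk1]
            simp [List.append_assoc]
        · have hEk : E < k := by omega
          simp only [if_neg (by omega : ¬ (k ≤ B)), if_neg (by omega : ¬ (k ≤ E)), if_neg h1,
            if_neg h2, if_neg (by simp; omega : ¬ (some k = some B)),
            if_neg (by simp; omega : ¬ (some k = some E)), hget]
          rw [htake, List.drop_append_of_le_length (by simp [List.length_take]; omega)]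
          simp [List.append_assoc]

theorem pvLoop1_lo (xs : List String) (m1 m2 : String) (B E k : Nat) (hBE : B ≤ E)
    (hk : k ≤ B) (hlen : k ≤ xs.length) :
    pvLoop1 xs m1 m2 (some B) (some E) k = xs.take k := by
  rw [pvLoop1_zones xs m1 m2 B E hBE k hlen, if_pos hk]

theorem pvLoop1_hi (xs : List String) (m1 m2 : String) (B E k : Nat) (hBE : B ≤ E) (hE : E < k)
    (hlen : k ≤ xs.length) :
    pvLoop1 xs m1 m2 (some B) (some E) k =
      xs.take B ++ [m1] ++ (xs.take (E + 1)).drop B ++ [m2] ++ (xs.take k).drop (E + 1) := by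
  rw [pvLoop1_zones xs m1 m2 B E hBE k hlen, if_neg (by omega), if_neg (by omega)]

-- ---- the per-item invariant and the main correspondence ----

def pvGoodSt (st : Option Nat × Option Nat) : Prop :=
  st = (none, none) ∨ ∃ B E : Nat, st = (some B, some E) ∧ B ≤ E

def pvOK : (Option Nat × Option Nat) → List (List String × List String × List String) → Prop
  | _, [] => True
  | st, it :: rest =>
      (it.2.1.length ≤ it.1.length ∧ it.2.1.length ≤ it.2.2.length) ∧
      (it.2.1 ≠ [] → (∀ s ∈ it.2.1, s = "_") →
        ∃ B E : Nat, st = (some B, some E) ∧ it.2.1.length ≤ B) ∧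
      pvOK (pvStepSt st it.2.1) rest

theorem pvGoodSt_step (st : Option Nat × Option Nat) (preds : List String) (h : pvGoodSt st) :
    pvGoodSt (pvStepSt st preds) := by
  unfold pvStepSt
  cases hE : bScanEnd preds preds.length with
  | none => exact h
  | some E =>
    right
    exact ⟨bScanBegin preds E, E, rfl, bScanBegin_le preds E⟩

theorem pvMainGo : ∀ (rest : List (List String × List String × List String)) st,
    pvGoodSt st → pvOK st rest → aGo rest st = rest.map bItem := by
  intro rest
  induction rest with
  | nil => intro st _ _; rfl
  | cons it rest ih =>
    intro st hgood hok
    obtain ⟨⟨hlt, hla⟩, hstale, hoktail⟩ := hok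
    show aSecond it.1 it.2.1 it.2.2 (aFirst it.2.1 st).1 (aFirst it.2.1 st).2 :: aGo rest (aFirst it.2.1 st)
        = bItem it :: rest.map bItem
    rw [aFirst_eq]
    congr 1
    · cases hE : bScanEnd it.2.1 it.2.1.length with
      | some E =>
        have hstep : pvStepSt st it.2.1 = (some (bScanBegin it.2.1 E), some E) := by
          unfold pvStepSt
          rw [hE]
        obtain ⟨hElt, _, _⟩ := bScanEnd_some_spec it.2.1 it.2.1.length E hE
        have hBle := bScanBegin_le it.2.1 E
        rw [hstep, aSecond_eq]
        simp only [bItem, hE]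
        rw [pvLoop1_hi it.1 "<tgt>" "</tgt>" _ E _ hBle hElt hlt,
          pvLoop1_hi it.2.1 "_" "_" _ E _ hBle hElt (le_refl _),
          pvLoop1_hi it.2.2 "X" "X" _ E _ hBle hElt hla]
      | none =>
        have hstep : pvStepSt st it.2.1 = st := by
          unfold pvStepSt
          rw [hE]
        by_cases hp : it.2.1 = []
        · rw [hstep, aSecond_eq]
          simp [bItem, hp, pvLoop1, bScanEnd]
        · have hallU : ∀ s ∈ it.2.1, s = "_" :=
            (pvAllU_iff it.2.1).mpr (bScanEnd_none_spec it.2.1 it.2.1.length hE)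
          obtain ⟨B, E, hst, hnB⟩ := hstale hp hallU
          have hBE : B ≤ E := by
            rcases hgood with h | ⟨B', E', hst', hbe'⟩
            · rw [h] at hst
              exact absurd hst (by simp)
            · rw [hst'] at hst
              simp only [Prod.mk.injEq, Option.some.injEq] at hst
              omega
          rw [hstep, hst, aSecond_eq]
          simp only [bItem, hE]
          rw [pvLoop1_lo it.1 "<tgt>" "</tgt>" B E _ hBE hnB hlt,
            pvLoop1_lo it.2.1 "_" "_" B E _ hBE hnB (le_refl _),
            pvLoop1_lo it.2.2 "X" "X" B E _ hBE hnB hla]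
    · exact ih (pvStepSt st it.2.1) (pvGoodSt_step st it.2.1 hgood) hoktail

theorem bScanEnd_none_of_allU (preds : List String) (k : Nat)
    (h : ∀ m, m < k → preds.getD m "" = "_") : bScanEnd preds k = none := by
  cases hE : bScanEnd preds k with
  | none => rfl
  | some E =>
    obtain ⟨h1, h2, _⟩ := bScanEnd_some_spec preds k E hE
    exact absurd (h E h1) h2

theorem pvLoop1_len (xs : List String) (m1 m2 : String) (B E k : Nat) (hBE : B ≤ E)
    (hBk : B < k) (hk : k ≤ xs.length) :
    k < (pvLoop1 xs m1 m2 (some B) (some E) k).length := by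
  rw [pvLoop1_zones xs m1 m2 B E hBE k hk]
  split_ifs with h1 h2
  · omega
  · simp [List.length_take, List.length_drop]
    omega
  · simp [List.length_take, List.length_drop]
    omega

theorem aGo_append : ∀ (xs ys : List (List String × List String × List String)) st,
    aGo (xs ++ ys) st = aGo xs st ++ aGo ys (xs.foldl (fun s it => aFirst it.2.1 s) st) := by
  intro xs
  induction xs with
  | nil => intro ys st; simp [aGo]
  | cons it xs ih =>
    intro ys st
    show aSecond _ _ _ _ _ :: aGo (xs ++ ys) (aFirst it.2.1 st) = _
    rw [ih ys (aFirst it.2.1 st)]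
    simp [aGo]

theorem aGo_length : ∀ (xs : List (List String × List String × List String)) st,
    (aGo xs st).length = xs.length := by
  intro xs
  induction xs with
  | nil => intro st; rfl
  | cons it xs ih =>
    intro st
    simp [aGo, ih]

-- ---- the cross-item state: what begin/end hold after a prefix ----

def pvStateDesc (pre : List (List String × List String × List String))
    (st : Option Nat × Option Nat) : Prop :=
  (st = (none, none) ∧ ∀ it ∈ pre, ∀ s ∈ it.2.1, s = "_")
  ∨ ∃ j, j < pre.length ∧ (∃ s ∈ pPreds pre j, s ≠ "_") ∧
      (∀ k, j < k → k < pre.length → ∀ s ∈ pPreds pre k, s = "_") ∧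
      ∃ E, bScanEnd (pPreds pre j) (pPreds pre j).length = some E ∧
        st = (some (bScanBegin (pPreds pre j) E), some E)

theorem pvStateDesc_step (pre : List (List String × List String × List String))
    (it : List String × List String × List String) (st : Option Nat × Option Nat)
    (h : pvStateDesc pre st) :
    pvStateDesc (pre ++ [it]) (pvStepSt st it.2.1) := by
  cases hE : bScanEnd it.2.1 it.2.1.length with
  | some E =>
    have hstep : pvStepSt st it.2.1 = (some (bScanBegin it.2.1 E), some E) := by
      unfold pvStepSt
      rw [hE]
    rw [hstep]
    right
    refine ⟨pre.length, by simp, ?_, ?_, E, ?_, ?_⟩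
    · rw [pPreds_append_self pre it []]
      obtain ⟨hlt, hne, _⟩ := bScanEnd_some_spec it.2.1 it.2.1.length E hE
      refine ⟨it.2.1[E], List.getElem_mem hlt, ?_⟩
      rwa [List.getD_eq_getElem it.2.1 "" hlt] at hne
    · intro k hk1 hk2
      simp at hk2
      omega
    · rw [pPreds_append_self pre it []]
      exact hE
    · rw [pPreds_append_self pre it []]
  | none =>
    have hstep : pvStepSt st it.2.1 = st := by
      unfold pvStepSt
      rw [hE]
    rw [hstep]
    have hallU : ∀ s ∈ it.2.1, s = "_" :=
      (pvAllU_iff it.2.1).mpr (bScanEnd_none_spec it.2.1 it.2.1.length hE)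
    rcases h with ⟨hst, hall⟩ | ⟨j, hj, hpred, hbet, E, hEj, hst⟩
    · left
      refine ⟨hst, ?_⟩
      intro x hx
      rcases List.mem_append.mp hx with h' | h'
      · exact hall x h'
      · rw [List.mem_singleton.mp h']
        exact hallU
    · right
      refine ⟨j, by simp; omega, ?_, ?_, E, ?_, ?_⟩
      · rwa [pPreds_append_left pre [it] j hj]
      · intro k hk1 hk2 s hs
        rw [List.length_append, List.length_cons, List.length_nil] at hk2
        by_cases hkp : k < pre.length
        · rw [pPreds_append_left pre [it] k hkp] at hs
          exact hbet k hk1 hkp s hs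
        · have hkeq : k = pre.length := by omega
          subst hkeq
          rw [pPreds_append_self pre it []] at hs
          exact hallU s hs
      · rwa [pPreds_append_left pre [it] j hj]
      · rwa [pPreds_append_left pre [it] j hj]



-- ---- counting the trailing '_' block and the last predicate run ----

theorem pvTakeWhile_len (p : String → Bool) :
    ∀ (l : List String) (k : Nat), k ≤ l.length →
      (∀ m, m < k → p (l.getD m "") = true) →
      (k = l.length ∨ p (l.getD k "") = false) →
      (l.takeWhile p).length = k := by
  intro l
  induction l with
  | nil => intro k hk _ _; simp at hk; simp [hk]
  | cons a l ih =>
    intro k hk hall hbd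
    cases k with
    | zero =>
      rcases hbd with h | h
      · simp at h
      · simp [List.getD_cons_zero] at h
        simp [List.takeWhile_cons, h]
    | succ k =>
      have ha : p a = true := by
        have := hall 0 (by omega)
        simpa [List.getD_cons_zero] using this
      rw [List.takeWhile_cons, if_pos ha]
      simp only [List.length_cons]
      congr 1
      apply ih k (by simp at hk; omega)
      · intro m hm
        have := hall (m + 1) (by omega)
        simpa [List.getD_cons_succ] using this
      · rcases hbd with h | h
        · left; simp at h; omega
        · right; simpa [List.getD_cons_succ] using h

theorem pvDropWhile_drop (p : String → Bool) :
    ∀ (l : List String), l.dropWhile p = l.drop ((l.takeWhile p).length) := by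
  intro l
  induction l with
  | nil => rfl
  | cons a l ih =>
    by_cases ha : p a = true
    · rw [List.dropWhile_cons, if_pos ha, List.takeWhile_cons, if_pos ha]
      simpa using ih
    · rw [List.dropWhile_cons, if_neg ha, List.takeWhile_cons, if_neg ha]
      simp

theorem pvRev_getD (l : List String) (m : Nat) (hm : m < l.length) :
    l.reverse.getD m "" = l.getD (l.length - 1 - m) "" := by
  have h1 : m < l.reverse.length := by simpa using hm
  have h2 : l.length - 1 - m < l.length := by omega
  rw [List.getD_eq_getElem _ _ h1, List.getD_eq_getElem _ _ h2, List.getElem_reverse]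

theorem pvDrop_getD (l : List String) (i m : Nat) (h : i + m < l.length) :
    (l.drop i).getD m "" = l.getD (i + m) "" := by
  have h1 : m < (l.drop i).length := by simp [List.length_drop]; omega
  rw [List.getD_eq_getElem _ _ h1, List.getD_eq_getElem _ _ h, List.getElem_drop]

theorem pvStale_count (preds : List String) (E : Nat)
    (hE : bScanEnd preds preds.length = some E) :
    ((preds.rdropWhile (fun s => s == "_")).rdropWhile (fun s => s != "_")).length
      = bScanBegin preds E := by
  obtain ⟨hEn, hEne, hEab⟩ := bScanEnd_some_spec preds preds.length E hE
  have hble := bScanBegin_le preds E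
  have hu : (preds.reverse.takeWhile (fun s => s == "_")).length = preds.length - E - 1 := by
    apply pvTakeWhile_len
    · simp; omega
    · intro m hm
      have hidx : preds.length - 1 - m < preds.length := by omega
      rw [pvRev_getD preds m (by omega)]
      have := hEab (preds.length - 1 - m) (by omega) hidx
      simp only [beq_iff_eq]
      exact this
    · right
      rw [pvRev_getD preds _ (by omega)]
      have hidx : preds.length - 1 - (preds.length - E - 1) = E := by omega
      rw [hidx]
      simpa using hEne
  have hX : preds.reverse.dropWhile (fun s => s == "_")
      = preds.reverse.drop (preds.length - E - 1) := by
    rw [pvDropWhile_drop, hu]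
  have hv : ((preds.reverse.drop (preds.length - E - 1)).takeWhile (fun s => s != "_")).length
      = E + 1 - bScanBegin preds E := by
    apply pvTakeWhile_len
    · simp [List.length_drop]; omega
    · intro m hm
      rw [pvDrop_getD preds.reverse _ _ (by simp; omega), pvRev_getD preds _ (by omega)]
      have hidx : preds.length - 1 - (preds.length - E - 1 + m) = E - m := by omega
      rw [hidx]
      have hne : preds.getD (E - m) "" ≠ "_" := by
        rcases Nat.lt_or_ge (E - m) E with h' | h'
        · exact bScanBegin_run preds E (E - m) (by omega) h'
        · have : E - m = E := by omega
          rw [this]; exact hEne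
      simpa using hne
    · rcases Nat.eq_zero_or_pos (bScanBegin preds E) with hb0 | hbpos
      · left
        simp [List.length_drop, hb0]
        omega
      · right
        rw [pvDrop_getD preds.reverse _ _ (by simp; omega), pvRev_getD preds _ (by omega)]
        have hidx : preds.length - 1 - (preds.length - E - 1 + (E + 1 - bScanBegin preds E))
            = bScanBegin preds E - 1 := by omega
        rw [hidx]
        rcases bScanBegin_boundary preds E with h0 | h0
        · omega
        · rw [h0]
          simp
  rw [List.rdropWhile, List.rdropWhile, List.reverse_reverse, hX, List.length_reverse,
    pvDropWhile_drop, hv, List.drop_drop, List.length_drop, List.length_reverse]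
  omega

def pvFoldSt (st : Option Nat × Option Nat)
    (l : List (List String × List String × List String)) : Option Nat × Option Nat :=
  l.foldl (fun s it => aFirst it.2.1 s) st

theorem pvFoldSt_desc : ∀ (ys pre : List (List String × List String × List String)) st,
    pvStateDesc pre st → pvStateDesc (pre ++ ys) (pvFoldSt st ys) := by
  intro ys
  induction ys with
  | nil => intro pre st h; simpa [pvFoldSt] using h
  | cons it ys ih =>
    intro pre st h
    have h1 := pvStateDesc_step pre it st h
    have h2 := ih (pre ++ [it]) (pvStepSt st it.2.1) h1
    rw [List.append_assoc] at h2
    show pvStateDesc (pre ++ (it :: ys)) ((it :: ys).foldl (fun s it => aFirst it.2.1 s) st)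
    rw [List.foldl_cons, aFirst_eq]
    simpa [pvFoldSt] using h2

theorem pvStateDesc_nil : pvStateDesc [] (none, none) := by
  left
  exact ⟨rfl, by simp⟩

-- ---- rdropWhile selects the nearest predicate-bearing item ----

theorem pvRdrop_all {α : Type} (p : α → Bool) (l : List α) :
    ∀ (suf : List α), (∀ x ∈ suf, p x = true) → (l ++ suf).rdropWhile p = l.rdropWhile p := by
  intro suf
  induction suf using List.reverseRecOn with
  | nil => intro _; simp
  | append_singleton suf x ih =>
    intro h
    rw [← List.append_assoc, List.rdropWhile_concat_pos]
    · exact ih (fun y hy => h y (by simp [hy]))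
    · exact h x (by simp)

theorem pvDropAllP (t : List (List String × List String × List String)) (j : Nat)
    (hbet : ∀ k, j < k → k < t.length → ∀ s ∈ pPreds t k, s = "_") :
    ∀ x ∈ t.drop (j + 1), (x.2.1.all (· == "_")) = true := by
  intro x hx
  obtain ⟨m, hm, rfl⟩ := List.mem_iff_getElem.mp hx
  rw [List.getElem_drop]
  have hidx : j + 1 + m < t.length := by
    simp [List.length_drop] at hm
    omega
  apply List.all_eq_true.mpr
  intro s hs
  have := hbet (j + 1 + m) (by omega) hidx s (by rw [pPreds_getElem t _ hidx]; exact hs)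
  simp [this]

theorem pvNearest (t : List (List String × List String × List String)) (j : Nat)
    (hj : j < t.length) (hpredj : ∃ s ∈ pPreds t j, s ≠ "_")
    (hbet : ∀ k, j < k → k < t.length → ∀ s ∈ pPreds t k, s = "_") :
    (t.rdropWhile (·.2.1.all (· == "_"))).getLastD default = t.getD j ([], [], []) := by
  have hsplit : t = t.take (j + 1) ++ t.drop (j + 1) := (List.take_append_drop _ _).symm
  have htj : t.take (j + 1) = t.take j ++ [t[j]] := by
    rw [List.take_succ, List.getElem?_eq_getElem hj]
    rfl
  have hnotp : (t[j].2.1.all (· == "_")) = false := by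
    obtain ⟨s, hs, hsne⟩ := hpredj
    rw [pPreds_getElem t j hj] at hs
    apply Bool.eq_false_iff.mpr
    intro htrue
    exact hsne (by simpa using List.all_eq_true.mp htrue s hs)
  conv_lhs => rw [hsplit]
  rw [pvRdrop_all _ _ _ (pvDropAllP t j hbet), htj,
    List.rdropWhile_concat_neg _ _ _ (by simp [hnotp]), List.getLastD_concat,
    List.getD_eq_getElem t _ hj]

-- ---- bridging the declarative Pre_/D_ to the loop invariant ----

theorem pvBridge : ∀ (rest pre : List (List String × List String × List String)) st,
    pvStateDesc pre st →
    Pre_data2tgt_data (pre ++ rest) → ¬ D_data2tgt_data (pre ++ rest) →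
    pvOK st rest := by
  intro rest
  induction rest with
  | nil => intro pre st _ _ _; trivial
  | cons it rest ih =>
    intro pre st hdesc hpre hnd
    have hmem : it ∈ pre ++ it :: rest := by simp
    refine ⟨hpre.1 it hmem, ?_, ?_⟩
    · intro hne hallU
      have hipreds : pPreds (pre ++ it :: rest) pre.length = it.2.1 :=
        pPreds_append_self pre it rest
      have hilen : pre.length < (pre ++ it :: rest).length := by simp
      rcases hdesc with ⟨hst, hall⟩ | ⟨j, hj, hpredj, hbet, E, hEj, hst⟩
      · exfalso
        obtain ⟨j, hji, s, hs, hne'⟩ := hpre.2 pre.length hilen (by rw [pvBang_eq, hipreds]; exact hne)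
        rw [pvBang_eq] at hs
        rcases Nat.lt_or_ge j pre.length with h' | h'
        · rw [pPreds_append_left pre (it :: rest) j h'] at hs
          have hjmem : pre.getD j ([], [], []) ∈ pre := by
            rw [List.getD_eq_getElem pre ([], [], []) h']
            exact List.getElem_mem h'
          exact hne' (hall _ hjmem s hs)
        · have hjeq : j = pre.length := by omega
          subst hjeq
          rw [hipreds] at hs
          exact hne' (hallU s hs)
      · obtain ⟨hjlen, hEne, hEab⟩ :=
          bScanEnd_some_spec (pPreds pre j) (pPreds pre j).length E hEj
        refine ⟨bScanBegin (pPreds pre j) E, E, hst, ?_⟩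
        by_contra hlt
        push_neg at hlt
        apply hnd
        refine ⟨pre.length, hilen, ?_, ?_, ?_⟩
        · rw [pvBang_eq, hipreds]; exact hallU
        · rw [List.take_left, pvNearest pre j hj hpredj hbet]
          show ((pPreds pre j).rdropWhile (· == "_")) ≠ []
          intro hq
          obtain ⟨s, hs, hsne⟩ := hpredj
          have := List.rdropWhile_eq_nil_iff.mp hq s hs
          simp at this
          exact hsne this
        · rw [List.take_left, pvNearest pre j hj hpredj hbet,
            pvBang_eq (pre ++ it :: rest) pre.length, hipreds]
          show (((pPreds pre j).rdropWhile (· == "_")).rdropWhile (· != "_")).length < it.2.1.length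
          rw [pvStale_count (pPreds pre j) E hEj]
          exact hlt

    · have hstep := pvStateDesc_step pre it st hdesc
      have hrec := ih (pre ++ [it]) (pvStepSt st it.2.1) hstep
      rw [List.append_assoc] at hrec
      exact hrec hpre hnd

-- ---- tightness: A and B differ everywhere inside D_ ----

def pItem (l : List (List String × List String × List String)) (i : Nat) :
    List String × List String × List String :=
  l.getD i ([], [], [])

theorem pItem_mem (l : List (List String × List String × List String)) (i : Nat)
    (h : i < l.length) : pItem l i ∈ l := by
  unfold pItem
  rw [List.getD_eq_getElem _ _ h]
  exact List.getElem_mem h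

theorem pv_tight (inp : List (List String × List String × List String))
    (hpre : Pre_data2tgt_data inp) (hD : D_data2tgt_data inp) :
    data2tgt_data inp ≠ data2tgt_data_alt inp := by
  intro heq
  obtain ⟨i, hi, hallU, hqne, hblt⟩ := hD
  rw [pvBang_eq] at hallU
  rw [pvBang_eq inp i] at hblt
  have hile : i ≤ inp.length := le_of_lt hi
  have hleni : (inp.take i).length = i := by simp [List.length_take]; omega
  have hdesc : pvStateDesc (inp.take i) (pvFoldSt (none, none) (inp.take i)) := by
    simpa using pvFoldSt_desc (inp.take i) [] (none, none) pvStateDesc_nil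
  rcases hdesc with ⟨hstn, hall⟩ | ⟨j0, hj0, hpredj0, hbet0, E0, hE0, hstv⟩
  · apply hqne
    have hrnil : (inp.take i).rdropWhile (·.2.1.all (· == "_")) = [] := by
      apply List.rdropWhile_eq_nil_iff.mpr
      intro x hx
      apply List.all_eq_true.mpr
      intro s hs
      have := hall x hx s hs
      simp [this]
    rw [hrnil]
    rfl
  · have hj0i : j0 < i := by rwa [hleni] at hj0
    have htk := pPreds_take inp i j0 hj0i hile
    rw [pvNearest (inp.take i) j0 hj0 hpredj0 hbet0] at hblt
    have htk' : ((inp.take i).getD j0 ([], [], [])).2.1 = pPreds inp j0 := htk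
    rw [htk'] at hblt
    rw [htk] at hE0 hstv
    have hcnt := pvStale_count (pPreds inp j0) E0 hE0
    rw [hcnt] at hblt
    have hb0E := bScanBegin_le (pPreds inp j0) E0
    have hit : pItem inp i ∈ inp := pItem_mem inp i hi
    have hnle : (pPreds inp i).length ≤ (pItem inp i).1.length := (hpre.1 _ hit).1
    have hitp : (pItem inp i).2.1 = pPreds inp i := rfl
    have hEnone : bScanEnd (pPreds inp i) (pPreds inp i).length = none := by
      apply bScanEnd_none_of_allU
      exact (pvAllU_iff _).mp hallU
    have hsplit : inp = inp.take i ++ inp.drop i := (List.take_append_drop i inp).symm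
    have hdropcons : inp.drop i = pItem inp i :: inp.drop (i + 1) := by
      rw [List.drop_eq_getElem_cons hi]
      unfold pItem
      rw [List.getD_eq_getElem _ _ hi]
    have hfirst : aFirst (pItem inp i).2.1 (pvFoldSt (none, none) (inp.take i))
        = (some (bScanBegin (pPreds inp j0) E0), some E0) := by
      rw [aFirst_eq]
      unfold pvStepSt
      rw [hitp, hEnone, hstv]
    have hA1 : data2tgt_data inp = aGo (inp.take i) (none, none)
        ++ aGo (inp.drop i) (pvFoldSt (none, none) (inp.take i)) := by
      show aGo inp (none, none) = _
      conv_lhs => rw [hsplit]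
      rw [aGo_append]
      rfl
    have hAi : (data2tgt_data inp)[i]? = some (aSecond (pItem inp i).1 (pItem inp i).2.1
        (pItem inp i).2.2 (some (bScanBegin (pPreds inp j0) E0)) (some E0)) := by
      rw [hA1, List.getElem?_append_right (by rw [aGo_length, hleni])]
      rw [aGo_length, hleni, Nat.sub_self, hdropcons]
      show (aSecond _ _ _ (aFirst (pItem inp i).2.1 (pvFoldSt (none, none) (inp.take i))).1
        (aFirst (pItem inp i).2.1 (pvFoldSt (none, none) (inp.take i))).2
        :: aGo (inp.drop (i + 1)) _)[0]? = _
      rw [hfirst]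
      simp
    have hBi : (data2tgt_data_alt inp)[i]? = some (bItem (pItem inp i)) := by
      show (inp.map bItem)[i]? = _
      rw [List.getElem?_map, List.getElem?_eq_getElem hi]
      simp only [Option.map_some]
      congr 1
      unfold pItem
      rw [List.getD_eq_getElem _ _ hi]
    rw [heq, hBi] at hAi
    have hsent := Option.some.inj hAi
    rw [aSecond_eq] at hsent
    simp only [bItem, hitp, hEnone] at hsent
    have htok := ((List.cons.injEq _ _ _ _).mp hsent).1
    have hlen1 := congrArg List.length htok
    rw [List.length_take] at hlen1
    have hlarge := pvLoop1_len (pItem inp i).1 "<tgt>" "</tgt>"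
      (bScanBegin (pPreds inp j0) E0) E0 (pPreds inp i).length hb0E hblt hnle
    omega

-- ===== VERDICT (by name: the statement is the Claim_ definition above) =====
theorem data2tgt_data_spec : Claim_unchanged_data2tgt_data := by
  intro input_data _ hpre hnd
  show data2tgt_data input_data = data2tgt_data_alt input_data
  have hok : pvOK (none, none) input_data := by
    have := pvBridge input_data [] (none, none) pvStateDesc_nil
    simpa using this (by simpa using hpre) (by simpa using hnd)
  exact pvMainGo input_data (none, none) (Or.inl rfl) hok

theorem data2tgt_data_changed : Claim_changed_data2tgt_data := by
  unfold Claim_changed_data2tgt_data; decide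

theorem data2tgt_data_tight : Claim_exact_data2tgt_data := by
  intro input_data _ hpre hD
  exact pv_tight input_data hpre hD
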